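-- pv_equiv track=rewrite | github.com/jozhang97/CenterNet2 | projects/CenterNet2/centernet/ct_utils/track_utils.py | _make_track_ids_unique
-- ===== SOURCE A (Python) =====
-- from collections import defaultdict
-- import itertools
--
-- def _make_track_ids_unique(annotations):
--     """
--     Makes the track IDs unqiue over the whole annotation set. Adapted from https://github.com/TAO-Dataset/
--     :param annotations: the annotation set
--     :return: the number of updated IDs
--     """
--     track_id_videos = {}
--     track_ids_to_update = set()
--     max_track_id = 0
--     for ann in annotations:
--         t = ann['track_id']
--         if t not in track_id_videos:
--             track_id_videos[t] = ann['video_id']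
--
--         if ann['video_id'] != track_id_videos[t]:
--             # Track id is assigned to multiple videos
--             track_ids_to_update.add(t)
--         max_track_id = max(max_track_id, t)
--
--     if track_ids_to_update:
--         next_id = itertools.count(max_track_id + 1)
--         new_track_ids = defaultdict(lambda: next(next_id))
--         for ann in annotations:
--             t = ann['track_id']
--             v = ann['video_id']
--             if t in track_ids_to_update:
--                 ann['track_id'] = new_track_ids[t, v]
--     return len(track_ids_to_update)
-- ===== SOURCE B (Python) =====
-- from collections import defaultdict
-- import itertools
--
-- def _make_track_ids_unique(annotations):
--     """
--     Makes the track IDs unique over the whole annotation set.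
--     Sort-then-scan: dedupe the (track_id, video_id) pairs, sort them by track_id,
--     and flag every track id that appears in two adjacent (hence distinct) pairs.
--     :param annotations: the annotation set
--     :return: the number of updated IDs
--     """
--     pairs = sorted(dict.fromkeys((ann['track_id'], ann['video_id']) for ann in annotations),
--                    key=lambda p: p[0])
--     track_ids_to_update = {b[0] for a, b in zip(pairs, pairs[1:]) if a[0] == b[0]}
--
--     if track_ids_to_update:
--         max_track_id = max(0, pairs[-1][0])
--         next_id = itertools.count(max_track_id + 1)
--         new_track_ids = defaultdict(lambda: next(next_id))
--         for ann in annotations: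
--             t = ann['track_id']
--             if t in track_ids_to_update:
--                 ann['track_id'] = new_track_ids[t, ann['video_id']]
--
--     return len(track_ids_to_update)
-- ===== Notes on version B (the rewrite author's own statement) =====
-- stated objective: alternative
-- what changed: Replaces A's single-pass detection with three parallel accumulators (first-video dict, conflict set, running max) by a sort-then-scan algorithm: dedupe the (track_id, video_id) pairs, sort them by track_id, and flag a track whenever two adjacent sorted pairs share it; the in-place reassignment pass is kept with the same counter.
import Mathlib
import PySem

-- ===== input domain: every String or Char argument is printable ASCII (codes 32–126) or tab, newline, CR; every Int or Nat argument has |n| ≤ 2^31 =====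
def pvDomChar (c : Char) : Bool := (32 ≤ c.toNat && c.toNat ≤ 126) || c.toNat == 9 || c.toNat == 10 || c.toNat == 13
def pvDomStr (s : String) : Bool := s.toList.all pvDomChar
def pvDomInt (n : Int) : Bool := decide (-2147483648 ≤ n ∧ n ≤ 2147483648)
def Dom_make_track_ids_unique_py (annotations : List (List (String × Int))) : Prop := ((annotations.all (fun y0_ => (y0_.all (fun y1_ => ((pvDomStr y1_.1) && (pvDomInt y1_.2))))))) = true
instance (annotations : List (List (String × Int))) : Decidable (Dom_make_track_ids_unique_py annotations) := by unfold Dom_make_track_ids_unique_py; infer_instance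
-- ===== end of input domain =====

-- B replaces A's single-pass detection (first-video dict + conflict set + running max) by a
-- sort-then-scan over the deduplicated (track_id, video_id) pairs (objective: alternative).
-- Both Pythons also reassign ann['track_id'] in place identically; the equivalence proved
-- here is about the RETURN value.


-- ===== PORT A =====
-- ann['track_id'] / ann['video_id']: the annotation dict, with Python's duplicate-key
-- semantics (Dict.ofList: later pair overwrites); total under Pre_ (both keys present).
def pvTrack (ann : List (String × Int)) : Int :=
  (PySem.Dict.ofList ann).getD "track_id" 0

def pvVideo (ann : List (String × Int)) : Int :=
  (PySem.Dict.ofList ann).getD "video_id" 0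

-- first loop of A: state (track_id_videos, track_ids_to_update, max_track_id)
def pvAStep (st : PySem.Dict Int Int × PySem.Set Int × Int) (ann : List (String × Int)) :
    PySem.Dict Int Int × PySem.Set Int × Int :=
  let t := pvTrack ann
  let tv := if st.1.contains t then st.1 else st.1.insert t (pvVideo ann)
  let upd := if pvVideo ann ≠ tv.getD t 0 then PySem.Set.add st.2.1 t else st.2.1
  (tv, upd, max st.2.2 t)

-- A's second loop only reassigns ann['track_id'] inside the (unchanged) annotation dicts;
-- it does not affect the returned len(track_ids_to_update), so it is not modelled here.
def make_track_ids_unique_py (annotations : List (List (String × Int))) : Int :=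
  let st := annotations.foldl pvAStep (PySem.Dict.empty, PySem.Set.empty, 0)
  (st.2.1.length : Int)

-- ===== PORT B =====
-- pairs = sorted(dict.fromkeys(...), key=lambda p: p[0]); pairs[1:] is pairs.tail
-- (PySem.List.slice_from_one : xs[1:] = xs.tail).
def pvBPairs (annotations : List (List (String × Int))) : List (Int × Int) :=
  PySem.List.sorted
    (PySem.List.dedup (annotations.map (fun ann => (pvTrack ann, pvVideo ann))))
    (fun p => p.1)

-- B's reassignment loop likewise only mutates the annotation dicts in place; not modelled.
def make_track_ids_unique_py_alt (annotations : List (List (String × Int))) : Int :=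
  let pairs := pvBPairs annotations
  let updSet : PySem.Set Int := PySem.Set.ofList
    (((pairs.zip pairs.tail).filter (fun pq => pq.1.1 == pq.2.1)).map (fun pq => pq.2.1))
  (updSet.length : Int)

-- ===== PRECONDITION & SPEC =====
-- Pre_: every annotation dict has both keys 'track_id' and 'video_id' (else A raises KeyError).
def Pre_make_track_ids_unique_py (annotations : List (List (String × Int))) : Prop :=
  ∀ ann ∈ annotations,
    (PySem.Dict.ofList ann).contains "track_id" = true ∧
    (PySem.Dict.ofList ann).contains "video_id" = true
instance (annotations : List (List (String × Int))) : Decidable (Pre_make_track_ids_unique_py annotations) := by unfold Pre_make_track_ids_unique_py; infer_instance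

def pvWitness_make_track_ids_unique_py : (List (List (String × Int))) :=
  [[("track_id", 1), ("video_id", 10)], [("track_id", 1), ("video_id", 11)],
   [("track_id", 2), ("video_id", 10)]]

def Spec_make_track_ids_unique_py (annotations : List (List (String × Int))) (out : Int) : Prop := out = make_track_ids_unique_py_alt annotations
instance (annotations : List (List (String × Int))) (out : Int) : Decidable (Spec_make_track_ids_unique_py annotations out) := by unfold Spec_make_track_ids_unique_py; infer_instance

-- ===== CLAIM (what is proved, stated in full; the proofs are below) =====
def Claim_equal_make_track_ids_unique_py : Prop := ∀ (annotations : List (List (String × Int))), Dom_make_track_ids_unique_py annotations → Pre_make_track_ids_unique_py annotations → Spec_make_track_ids_unique_py annotations (make_track_ids_unique_py annotations)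

-- ===== LEMMAS AND PROOFS =====

-- the flat list of (track_id, video_id) pairs of the annotation set
def pvPairsOf (annotations : List (List (String × Int))) : List (Int × Int) :=
  annotations.map (fun ann => (pvTrack ann, pvVideo ann))

-- t is a conflicting track id: it occurs with two different video ids
def pvConf (P : List (Int × Int)) (t : Int) : Prop :=
  ∃ v1 v2, v1 ≠ v2 ∧ (t, v1) ∈ P ∧ (t, v2) ∈ P

-- A's first-loop characterisation, phrased against the pair list seen so far
def pvPred (P : List (Int × Int)) (t : Int) : Prop :=
  ∃ v, (t, v) ∈ P ∧ P.lookup t ≠ some v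


-- lookup through an appended singleton with a different key
theorem pvLookup_append_ne (P : List (Int × Int)) (t t0 v0 : Int) (ht : t ≠ t0) :
    (P ++ [(t0, v0)]).lookup t = P.lookup t := by
  rw [List.lookup_append]
  have h0 : List.lookup t [(t0, v0)] = none := by
    have hb : (t == t0) = false := by simpa using ht
    simp [List.lookup_cons, hb]
  rw [h0]
  cases P.lookup t <;> rfl

theorem pvPred_append_ne (P : List (Int × Int)) (t t0 v0 : Int) (ht : t ≠ t0) :
    pvPred (P ++ [(t0, v0)]) t ↔ pvPred P t := by
  unfold pvPred
  rw [pvLookup_append_ne P t t0 v0 ht]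
  constructor
  · rintro ⟨v, hv, hne⟩
    rcases List.mem_append.mp hv with h | h
    · exact ⟨v, h, hne⟩
    · simp at h; exact absurd h.1 ht
  · rintro ⟨v, hv, hne⟩
    exact ⟨v, List.mem_append_left _ hv, hne⟩

theorem pvPred_append_self (P : List (Int × Int)) (t0 v0 w : Int) (hw : P.lookup t0 = some w) :
    pvPred (P ++ [(t0, v0)]) t0 ↔ (pvPred P t0 ∨ v0 ≠ w) := by
  have hl : (P ++ [(t0, v0)]).lookup t0 = some w := by
    rw [List.lookup_append, hw]; rfl
  unfold pvPred
  rw [hl]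
  constructor
  · rintro ⟨v, hv, hne⟩
    rcases List.mem_append.mp hv with h | h
    · exact Or.inl ⟨v, h, by rw [hw]; exact hne⟩
    · simp at h
      exact Or.inr (fun hvw => hne (by rw [h, hvw]))
  · rintro (⟨v, hv, hne⟩ | hne)
    · exact ⟨v, List.mem_append_left _ hv, by rw [hw] at hne; exact hne⟩
    · exact ⟨v0, List.mem_append_right _ (by simp), by simpa using fun h => hne h.symm⟩

theorem pvPred_append_none (P : List (Int × Int)) (t0 v0 : Int) (hn : P.lookup t0 = none) :
    ¬ pvPred (P ++ [(t0, v0)]) t0 := by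
  have hnomem : ∀ v : Int, (t0, v) ∉ P := by
    intro v hv
    have := List.lookup_eq_none_iff.mp hn (t0, v) hv
    simp at this
  have hl : (P ++ [(t0, v0)]).lookup t0 = some v0 := by
    rw [List.lookup_append, hn]; simp
  rintro ⟨v, hv, hne⟩
  rcases List.mem_append.mp hv with h | h
  · exact hnomem v h
  · simp at h; exact hne (by rw [hl, h])

theorem pvPred_none (P : List (Int × Int)) (t0 : Int) (hn : P.lookup t0 = none) :
    ¬ pvPred P t0 := by
  rintro ⟨v, hv, -⟩
  have := List.lookup_eq_none_iff.mp hn (t0, v) hv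
  simp at this

theorem pvA_inv (l : List (List (String × Int))) :
    ∀ (tv : PySem.Dict Int Int) (upd : PySem.Set Int) (mx : Int) (P : List (Int × Int)),
      (∀ t, tv.get? t = P.lookup t) → upd.Nodup → (∀ t, t ∈ upd ↔ pvPred P t) →
      (∀ t, (l.foldl pvAStep (tv, upd, mx)).1.get? t = (P ++ pvPairsOf l).lookup t) ∧
      (l.foldl pvAStep (tv, upd, mx)).2.1.Nodup ∧
      (∀ t, t ∈ (l.foldl pvAStep (tv, upd, mx)).2.1 ↔ pvPred (P ++ pvPairsOf l) t) := by
  induction l with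
  | nil =>
    intro tv upd mx P h1 h2 h3
    simpa [pvPairsOf] using ⟨h1, h2, h3⟩
  | cons a l ih =>
    intro tv upd mx P h1 h2 h3
    have happ : P ++ pvPairsOf (a :: l) = (P ++ [(pvTrack a, pvVideo a)]) ++ pvPairsOf l := by
      simp [pvPairsOf]
    rw [happ, List.foldl_cons]
    by_cases hc : tv.contains (pvTrack a) = true
    · -- track id already seen: tv unchanged, conflict test against its first video
      have hs : (P.lookup (pvTrack a)).isSome := by
        rw [← h1, ← PySem.Dict.contains_eq_isSome_get?]; exact hc
      obtain ⟨w, hw⟩ := Option.isSome_iff_exists.mp hs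
      have hgd : tv.getD (pvTrack a) 0 = w := by
        rw [PySem.Dict.getD_eq_get?_getD, h1, hw]; rfl
      have hfold : pvAStep (tv, upd, mx) a =
          (tv, (if pvVideo a ≠ w then PySem.Set.add upd (pvTrack a) else upd),
           max mx (pvTrack a)) := by
        simp [pvAStep, hc, hgd]
      rw [hfold]
      refine ih tv _ _ (P ++ [(pvTrack a, pvVideo a)]) ?_ ?_ ?_
      · intro t
        by_cases ht : t = pvTrack a
        · subst ht; rw [h1, List.lookup_append, hw]; rfl
        · rw [pvLookup_append_ne P t _ _ ht, h1]
      · split_ifs with hv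
        · exact PySem.Set.nodup_add upd _ h2
        · exact h2
      · intro t
        by_cases ht : t = pvTrack a
        · subst ht
          rw [pvPred_append_self P _ _ w hw]
          split_ifs with hv
          · rw [PySem.Set.mem_add, h3]
            constructor
            · rintro (h | h)
              · exact Or.inl h
              · exact Or.inr hv
            · intro _; exact Or.inr rfl
          · push Not at hv
            rw [h3]
            constructor
            · exact Or.inl
            · rintro (h | h)
              · exact h
              · exact absurd hv h
        · rw [pvPred_append_ne P t _ _ ht]
          split_ifs with hv
          · rw [PySem.Set.mem_add]
            constructor
            · rintro (h | h)
              · exact (h3 t).mp h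
              · exact absurd h ht
            · intro h; exact Or.inl ((h3 t).mpr h)
          · exact h3 t
    · -- fresh track id: tv gains (t, v); the conflict test compares v with itself
      have hcf : tv.contains (pvTrack a) = false := by
        cases h : tv.contains (pvTrack a)
        · rfl
        · exact absurd h hc
      have hn : P.lookup (pvTrack a) = none := by
        have := PySem.Dict.contains_eq_isSome_get? tv (pvTrack a)
        rw [hcf, h1] at this
        cases h : P.lookup (pvTrack a)
        · rfl
        · rw [h] at this; simp at this
      have hfold : pvAStep (tv, upd, mx) a =
          (tv.insert (pvTrack a) (pvVideo a), upd, max mx (pvTrack a)) := by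
        simp [pvAStep, hcf, PySem.Dict.getD_insert_self]
      rw [hfold]
      refine ih _ _ _ (P ++ [(pvTrack a, pvVideo a)]) ?_ h2 ?_
      · intro t
        by_cases ht : t = pvTrack a
        · subst ht
          rw [PySem.Dict.get?_insert_self, List.lookup_append, hn]
          simp
        · rw [PySem.Dict.get?_insert_of_ne _ _ ht, pvLookup_append_ne P t _ _ ht, h1]
      · intro t
        by_cases ht : t = pvTrack a
        · subst ht
          constructor
          · intro h; exact absurd ((h3 _).mp h) (pvPred_none P _ hn)
          · intro h; exact absurd h (pvPred_append_none P _ _ hn)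
        · rw [pvPred_append_ne P t _ _ ht]; exact h3 t

theorem pvPred_iff_conf (P : List (Int × Int)) (t : Int) : pvPred P t ↔ pvConf P t := by
  constructor
  · rintro ⟨v, hv, hne⟩
    have hs : (P.lookup t).isSome := List.lookup_isSome_iff.mpr ⟨(t, v), hv, by simp⟩
    obtain ⟨w, hw⟩ := Option.isSome_iff_exists.mp hs
    obtain ⟨l1, l2, hPe, -⟩ := List.lookup_eq_some_iff.mp hw
    have hwP : (t, w) ∈ P := by
      rw [hPe]; exact List.mem_append_right _ List.mem_cons_self
    refine ⟨w, v, ?_, hwP, hv⟩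
    intro h; exact hne (by rw [hw, h])
  · rintro ⟨v1, v2, hne, h1, h2⟩
    have hs : (P.lookup t).isSome := List.lookup_isSome_iff.mpr ⟨(t, v1), h1, by simp⟩
    obtain ⟨w, hw⟩ := Option.isSome_iff_exists.mp hs
    by_cases h : w = v1
    · exact ⟨v2, h2, by rw [hw]; simp; omega⟩
    · exact ⟨v1, h1, by rw [hw]; simp [h]⟩

theorem pvB_mem (annotations : List (List (String × Int))) (t : Int) :
    (t ∈ ((((pvBPairs annotations).zip (pvBPairs annotations).tail).filter
            (fun pq => pq.1.1 == pq.2.1)).map (fun pq => pq.2.1))) ↔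
      pvConf (pvPairsOf annotations) t := by
  have hSdef : pvBPairs annotations =
      PySem.List.sorted (PySem.List.dedup (pvPairsOf annotations)) (fun p : Int × Int => p.1) := rfl
  rw [hSdef]
  generalize hD : PySem.List.dedup (pvPairsOf annotations) = D
  have hndD : D.Nodup := by rw [← hD]; exact PySem.List.nodup_dedup _
  set S := PySem.List.sorted D (fun p : Int × Int => p.1) with hS
  have hperm : S.Perm D := PySem.List.sorted_perm _ _ _
  have hndS : S.Nodup := hperm.nodup_iff.mpr hndD
  have hmemS : ∀ x : Int × Int, x ∈ S ↔ x ∈ pvPairsOf annotations := by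
    intro x
    rw [hS, PySem.List.mem_sorted, ← hD, PySem.List.mem_dedup]
  constructor
  · intro hL
    obtain ⟨pq, hpq, hpqt⟩ := List.mem_map.mp hL
    obtain ⟨hzip, heqb⟩ := List.mem_filter.mp hpq
    obtain ⟨i, hi, hzi⟩ := List.mem_iff_getElem.mp hzip
    have hlen : (S.zip S.tail).length = S.length - 1 := by
      rw [List.length_zip, List.length_tail]; omega
    have hi1 : i + 1 < S.length := by omega
    have hiS : i < S.length := by omega
    have hpq1 : pq = (S[i], S[i + 1]) := by
      rw [← hzi, List.getElem_zip, List.getElem_tail]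
    subst hpq1
    simp only at heqb hpqt
    have heq : S[i].1 = S[i + 1].1 := by simpa using heqb
    have hnei : S[i] ≠ S[i + 1] := by
      intro h
      have := (List.Nodup.getElem_inj_iff hndS).mp h
      omega
    have hne2 : S[i].2 ≠ S[i + 1].2 := by
      intro h; exact hnei (Prod.ext heq h)
    refine ⟨S[i].2, S[i + 1].2, hne2, ?_, ?_⟩
    · have : (t, S[i].2) = S[i] := by
        rw [← hpqt, ← heq]
      rw [this]; exact (hmemS _).mp (List.getElem_mem _)
    · have : (t, S[i + 1].2) = S[i + 1] := by
        rw [← hpqt]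
      rw [this]; exact (hmemS _).mp (List.getElem_mem _)
  · rintro ⟨v1, v2, hne, h1, h2⟩
    have key : ∀ (i j : ℕ) (hi : i < S.length) (hj : j < S.length), i < j →
        (S[i]'hi).1 = t → (S[j]'hj).1 = t →
        t ∈ (((S.zip S.tail).filter (fun pq => pq.1.1 == pq.2.1)).map (fun pq => pq.2.1)) := by
      intro i j hi hj hij hit hjt
      have hi1 : i + 1 < S.length := by omega
      have le1 : (S[i]'hi).1 ≤ (S[i + 1]'hi1).1 :=
        PySem.List.key_sorted_getElem_mono D (fun p : Int × Int => p.1) (Nat.le_succ i) hi1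
      have le2 : (S[i + 1]'hi1).1 ≤ (S[j]'hj).1 :=
        PySem.List.key_sorted_getElem_mono D (fun p : Int × Int => p.1) (by omega) hj
      have heq : (S[i + 1]'hi1).1 = t := le_antisymm (hjt ▸ le2) (hit ▸ le1)
      have hziplen : i < (S.zip S.tail).length := by
        rw [List.length_zip, List.length_tail]; omega
      have hzmem : (S[i]'hi, S[i + 1]'hi1) ∈ S.zip S.tail := by
        refine List.mem_iff_getElem.mpr ⟨i, hziplen, ?_⟩
        rw [List.getElem_zip, List.getElem_tail]
      refine List.mem_map.mpr ⟨(S[i]'hi, S[i + 1]'hi1), List.mem_filter.mpr ⟨hzmem, ?_⟩, heq⟩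
      simp [hit, heq]
    have h1S : (t, v1) ∈ S := (hmemS _).mpr h1
    have h2S : (t, v2) ∈ S := (hmemS _).mpr h2
    obtain ⟨i, hi, hSi⟩ := List.mem_iff_getElem.mp h1S
    obtain ⟨j, hj, hSj⟩ := List.mem_iff_getElem.mp h2S
    have hij : i ≠ j := by
      intro h; subst h
      rw [hSi] at hSj
      exact hne (by injection hSj)
    rcases Nat.lt_or_ge i j with h | h
    · exact key i j hi hj h (by rw [hSi]) (by rw [hSj])
    · have h' : j < i := by omega
      exact key j i hj hi h' (by rw [hSj]) (by rw [hSi])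

-- ===== VERDICT (by name: the statement is the Claim_ definition above) =====
theorem make_track_ids_unique_py_spec : Claim_equal_make_track_ids_unique_py := by
  intro annotations _ _
  unfold Spec_make_track_ids_unique_py
  obtain ⟨-, hnd, hmem⟩ := pvA_inv annotations PySem.Dict.empty PySem.Set.empty 0 []
    (fun t => by rw [PySem.Dict.get?_empty]; rfl) List.nodup_nil
    (fun t => by
      constructor
      · intro h; exact absurd h (List.not_mem_nil)
      · exact fun h => absurd h (pvPred_none [] t rfl))
  have hperm : (annotations.foldl pvAStep (PySem.Dict.empty, PySem.Set.empty, 0)).2.1.Perm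
      (PySem.Set.ofList ((((pvBPairs annotations).zip (pvBPairs annotations).tail).filter
          (fun pq => pq.1.1 == pq.2.1)).map (fun pq => pq.2.1))) := by
    refine (List.perm_ext_iff_of_nodup hnd (PySem.Set.nodup_ofList _)).mpr ?_
    intro t
    rw [PySem.Set.mem_ofList, hmem, List.nil_append, pvPred_iff_conf, pvB_mem]
  simp only [make_track_ids_unique_py, make_track_ids_unique_py_alt]
  exact_mod_cast congrArg Nat.cast hperm.length_eq
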